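-- pv_equiv track=rewrite | github.com/yh598/material_rag | palette/backend/app.py | _vote_counts
-- ===== SOURCE A (Python) =====
-- def _vote_counts(votes: dict[str, str]) -> dict:
--     approved = sum(1 for v in votes.values() if v == "approved")
--     disapproved = sum(1 for v in votes.values() if v == "disapproved")
--     return {
--         "approved": approved,
--         "disapproved": disapproved,
--         "total": len(votes),
--     }
-- ===== SOURCE B (Python) =====
-- def _vote_counts(votes: dict[str, str]) -> dict:
--     approved = disapproved = total = 0
--     for v in votes.values():
--         total += 1
--         if v == "approved":
--             approved += 1
--         elif v == "disapproved":
--             disapproved += 1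
--     return {
--         "approved": approved,
--         "disapproved": disapproved,
--         "total": total,
--     }
-- ===== Notes on version B (the rewrite author's own statement) =====
-- stated objective: simpler
-- what changed: Replaced A's two separate filtering sum-passes plus len() with one explicit loop that maintains three accumulators (approved, disapproved, total) in a single traversal.
import Mathlib
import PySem

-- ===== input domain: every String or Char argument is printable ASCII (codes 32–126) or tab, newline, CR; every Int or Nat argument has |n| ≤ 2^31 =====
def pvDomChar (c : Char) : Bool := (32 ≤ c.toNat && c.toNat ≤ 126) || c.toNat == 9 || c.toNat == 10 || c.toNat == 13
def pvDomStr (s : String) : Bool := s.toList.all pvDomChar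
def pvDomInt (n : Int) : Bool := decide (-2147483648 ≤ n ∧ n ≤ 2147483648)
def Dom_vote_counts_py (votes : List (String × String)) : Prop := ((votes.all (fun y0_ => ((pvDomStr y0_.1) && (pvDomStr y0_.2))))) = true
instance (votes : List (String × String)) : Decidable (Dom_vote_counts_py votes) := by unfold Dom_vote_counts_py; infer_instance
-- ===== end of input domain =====

-- B replaces A's two filtering sum-passes plus len() with one loop maintaining three accumulators (simpler; same O(n)).


-- ===== PORT A =====
-- approved = sum(1 for v in votes.values() if v == "approved"); disapproved likewise; total = len(votes)
def vote_counts_py (votes : List (String × String)) : List (String × Int) :=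
  let vals := votes.map Prod.snd
  let approved : Int := vals.foldl (fun acc v => if v == "approved" then acc + 1 else acc) 0
  let disapproved : Int := vals.foldl (fun acc v => if v == "disapproved" then acc + 1 else acc) 0
  [("approved", approved), ("disapproved", disapproved), ("total", (votes.length : Int))]

-- ===== PORT B =====
-- one loop over votes.values(): total += 1; if v == "approved": approved += 1 elif v == "disapproved": disapproved += 1
def vote_counts_py_alt (votes : List (String × String)) : List (String × Int) :=
  let st : Int × Int × Int :=
    (votes.map Prod.snd).foldl
      (fun (st : Int × Int × Int) v =>
        let (a, d, t) := st
        let t := t + 1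
        if v == "approved" then (a + 1, d, t)
        else if v == "disapproved" then (a, d + 1, t)
        else (a, d, t))
      (0, 0, 0)
  [("approved", st.1), ("disapproved", st.2.1), ("total", st.2.2)]

-- ===== PRECONDITION & SPEC =====
def Spec_vote_counts_py (votes : List (String × String)) (out : List (String × Int)) : Prop := out = vote_counts_py_alt votes
instance (votes : List (String × String)) (out : List (String × Int)) : Decidable (Spec_vote_counts_py votes out) := by unfold Spec_vote_counts_py; infer_instance

-- ===== CLAIM (what is proved, stated in full; the proofs are below) =====
def Claim_equal_vote_counts_py : Prop := ∀ (votes : List (String × String)), Dom_vote_counts_py votes → Spec_vote_counts_py votes (vote_counts_py votes)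

-- ===== LEMMAS AND PROOFS =====
theorem foldl_if_count (s : String) : ∀ (l : List String) (a : Int),
    l.foldl (fun acc v => if v = s then acc + 1 else acc) a = a + (l.count s : Int)
  | [], a => by simp [List.count]
  | v :: l, a => by
    simp only [List.foldl_cons, List.count_cons, foldl_if_count s l]
    by_cases h : v = s <;> simp [h] <;> push_cast <;> ring

theorem foldl_triple : ∀ (l : List String) (a d t : Int),
    l.foldl
      (fun (st : Int × Int × Int) v =>
        if v = "approved" then (st.1 + 1, st.2.1, st.2.2 + 1)
        else if v = "disapproved" then (st.1, st.2.1 + 1, st.2.2 + 1)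
        else (st.1, st.2.1, st.2.2 + 1))
      (a, d, t)
    = (a + (l.count "approved" : Int), d + (l.count "disapproved" : Int), t + (l.length : Int))
  | [], a, d, t => by simp
  | v :: l, a, d, t => by
    simp only [List.foldl_cons, List.count_cons, List.length_cons]
    by_cases h1 : v = "approved"
    · simp only [h1, foldl_triple l]
      refine Prod.ext ?_ (Prod.ext ?_ ?_) <;> simp <;> push_cast <;> ring
    · by_cases h2 : v = "disapproved"
      · simp only [h2, if_neg (by decide : ¬("disapproved" : String) = "approved"),
          foldl_triple l]
        refine Prod.ext ?_ (Prod.ext ?_ ?_) <;> simp <;> push_cast <;> ring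
      · simp only [if_neg h1, if_neg h2, foldl_triple l]
        refine Prod.ext ?_ (Prod.ext ?_ ?_) <;> simp [h1, h2] <;> push_cast <;> ring

-- ===== VERDICT (by name: the statement is the Claim_ definition above) =====
theorem vote_counts_py_spec : Claim_equal_vote_counts_py := by
  intro votes _
  unfold Spec_vote_counts_py vote_counts_py vote_counts_py_alt
  simp [foldl_triple, foldl_if_count]
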